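-- pv_equiv track=rewrite | github.com/mugglim/python-algo-study | 프로그래머스/레벨1/1.신규 아이디 추천.py | solution
-- ===== SOURCE A (Python) =====
-- def solution(new_id):
--     # 1단계
--     new_id = "".join([x.lower() if x.isupper() else x for x in new_id])
--     # 2단계
--     new_id = "".join([x for x in new_id  if x.isalpha() or x.isdigit() or x == "-" or x =="." or x == "_"])
--     # 3단계
--     is_find = False
--     tmp = ""
--     for x in new_id:
--         if x == "." and is_find == True:
--             continue
--         elif x == "." and is_find == False:
--             tmp += "."
--             is_find = True
--         elif x != ".":
--             tmp += x
--             is_find = False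
--     new_id = tmp
--
--     if new_id[0] == "." and new_id[-1] != ".":
--         new_id = new_id[1:]
--     elif new_id[0] != "." and new_id[-1] == ".":
--         new_id = new_id[:-1]
--     elif new_id[0] == "." and new_id[-1] == ".":
--         new_id = new_id[1:-1]
--
--     # 5단계
--     if len(new_id) == 0:
--         new_id = "a"
--
--     # 6단계
--     if len(new_id) >= 16:
--         new_id = new_id[:15]
--         if new_id[-1] == ".":
--             new_id = new_id[:-1]
--     # 7단계
--     if len(new_id) <= 2:
--         while len(new_id) != 3:
--             new_id += new_id[-1]
--
--     return new_id
-- ===== SOURCE B (Python) =====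
-- def solution(new_id):
--     # One fused left-to-right scan replaces A's four staged passes: it lowercases,
--     # filters, collapses dot runs and skips leading dots in a single loop, using a
--     # sentinel previous-char-was-a-dot state that starts true.
--     out = []
--     prev_dot = True  # sentinel initial state: leading dots are skipped
--     for c in new_id.lower():
--         if c == '.':
--             if not prev_dot:
--                 out.append('.')
--                 prev_dot = True
--         elif c.isalpha() or c.isdigit() or c in '-_':
--             out.append(c)
--             prev_dot = False
--     if out and out[-1] == '.':
--         out.pop()
--     s = ''.join(out) or 'a'
--     s = s[:15]
--     if s.endswith('.'):
--         s = s[:-1]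
--     return s + s[-1] * (3 - len(s))
-- ===== Notes on version B (the rewrite author's own statement) =====
-- stated objective: faster
-- what changed: A's four staged passes (lowercase comprehension, filter comprehension, flag-driven dot-collapse loop, four-branch edge-dot strip) are fused into one single scan with a sentinel previous-char-was-a-dot state that lowercases, filters, collapses dot runs and skips leading dots at once, followed by a pop of the trailing dot and a closed-form pad instead of the while-loop.
import Mathlib
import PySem

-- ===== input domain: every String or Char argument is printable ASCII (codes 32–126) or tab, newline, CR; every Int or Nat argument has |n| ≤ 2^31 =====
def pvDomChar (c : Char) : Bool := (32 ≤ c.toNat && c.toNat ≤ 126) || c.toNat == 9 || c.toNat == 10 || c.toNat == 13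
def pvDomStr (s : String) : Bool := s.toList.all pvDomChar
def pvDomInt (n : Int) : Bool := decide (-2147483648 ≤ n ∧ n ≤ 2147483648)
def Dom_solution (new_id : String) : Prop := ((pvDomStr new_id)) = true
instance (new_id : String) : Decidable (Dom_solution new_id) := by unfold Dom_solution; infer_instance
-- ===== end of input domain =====

-- B fuses A's four staged passes (lowercase, filter, flag-driven dot-collapse, four-branch
-- edge-dot strip) into one scan with a sentinel previous-char-was-a-dot state, then a single
-- trailing-dot pop and a closed-form pad (objective: faster, measured constant-factor; no mutation observable).

-- ===== PORT A =====
-- step 2's character test, in A's branch order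
def aOk (c : Char) : Bool :=
  PySem.Chars.isalpha c || PySem.Chars.isdigit c || c == '-' || c == '.' || c == '_'

-- step 3: the loop over state (is_find, tmp)
def aStep3 : List Char → Bool → List Char → List Char
  | [], _, tmp => tmp
  | c :: rest, isFind, tmp =>
    if c == '.' && isFind then aStep3 rest isFind tmp
    else if c == '.' && !isFind then aStep3 rest true (tmp ++ ['.'])
    else aStep3 rest false (tmp ++ [c])

-- step 7's while-loop; it is entered only at length 1 or 2, so fuel 3 is exact
def aPad : Nat → List Char → List Char
  | 0, l => l
  | n + 1, l =>
    if l.length ≠ 3 then aPad n (l ++ [(PySem.List.pyGet? l (-1)).getD 'a']) else l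

def solution (new_id : String) : String :=
  let s1 := new_id.toList.map (fun c => if PySem.Chars.isupper c then PySem.Chars.lowerChar c else c)
  let s2 := s1.filter aOk
  let s3 := aStep3 s2 false []
  -- new_id[0] / new_id[-1]: Python raises IndexError when s3 is empty; Pre_solution excludes that
  match PySem.List.pyGet? s3 0, PySem.List.pyGet? s3 (-1) with
  | some first, some last =>
    let s4 :=
      if first == '.' && last != '.' then PySem.List.slice s3 (some 1) none
      else if first != '.' && last == '.' then PySem.List.slice s3 none (some (-1))
      else if first == '.' && last == '.' then PySem.List.slice s3 (some 1) (some (-1))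
      else s3
    let s5 := if s4.length = 0 then ['a'] else s4
    let s6 :=
      if 16 ≤ s5.length then
        let t := PySem.List.slice s5 none (some 15)
        if PySem.List.pyGet? t (-1) == some '.' then PySem.List.slice t none (some (-1)) else t
      else s5
    let s7 := if s6.length ≤ 2 then aPad 3 s6 else s6
    String.mk s7
  | _, _ => ""

-- ===== PORT B =====
-- the fused scan: state = (out, prev_dot); prev_dot starts true (sentinel dot)
def bScan : List Char → List Char → Bool → List Char
  | [], out, _ => out
  | c0 :: rest, out, prevDot =>
    let c := PySem.Chars.lowerChar c0
    if c == '.' then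
      if !prevDot then bScan rest (out ++ ['.']) true
      else bScan rest out prevDot
    else if PySem.Chars.isalpha c || PySem.Chars.isdigit c || ['-', '_'].contains c then
      bScan rest (out ++ [c]) false
    else bScan rest out prevDot

def solution_alt (new_id : String) : String :=
  let t0 := bScan new_id.toList [] true
  -- if out and out[-1] == '.': out.pop()
  let t := if !t0.isEmpty && (PySem.List.pyGet? t0 (-1) == some '.') then t0.dropLast else t0
  let s5 := if t.isEmpty then ['a'] else t   -- ''.join(out) or 'a'
  let s6 := PySem.List.slice s5 none (some 15)
  let s7 := if PySem.Chars.endswith s6 ['.'] then PySem.List.slice s6 none (some (-1)) else s6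
  -- s[-1] * (3 - len(s)): Nat subtraction gives the empty repeat for a non-positive count,
  -- exactly as Python; s7 is never empty here, so the 'a' default of s7[-1] is unreachable
  String.mk (s7 ++ List.replicate (3 - s7.length) ((PySem.List.pyGet? s7 (-1)).getD 'a'))

-- ===== PRECONDITION & SPEC =====
-- Pre_ excludes exactly the inputs with no keepable character at all (no letter, digit,
-- hyphen, dot or underscore): there Python A raises IndexError at new_id[0] after step 3.
def Pre_solution (new_id : String) : Prop :=
  new_id.toList.any (fun c => aOk (PySem.Chars.lowerChar c)) = true
instance (new_id : String) : Decidable (Pre_solution new_id) := by unfold Pre_solution; infer_instance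

def pvWitness_solution : String := "aBc"

def Spec_solution (new_id : String) (out : String) : Prop := out = solution_alt new_id
instance (new_id : String) (out : String) : Decidable (Spec_solution new_id out) := by unfold Spec_solution; infer_instance

-- ===== CLAIM (what is proved, stated in full; the proofs are below) =====
def Claim_equal_solution : Prop := ∀ (new_id : String), Dom_solution new_id → Pre_solution new_id → Spec_solution new_id (solution new_id)

-- ===== LEMMAS AND PROOFS =====

-- step 1: per-character, A's conditional lowercase is lowerChar
theorem lower_step (c : Char) :
    (if PySem.Chars.isupper c then PySem.Chars.lowerChar c else c) = PySem.Chars.lowerChar c := by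
  by_cases h : PySem.Chars.isupper c = true <;> simp [PySem.Chars.lowerChar, h]

theorem char_beq_decide (a b : Char) : (a == b) = decide (a = b) := by
  by_cases h : a = b <;> simp [h]

-- A's membership test split as B's scan tests it
theorem aOk_split (c : Char) :
    aOk c = ((c == '.') || (PySem.Chars.isalpha c || PySem.Chars.isdigit c || ['-', '_'].contains c)) := by
  by_cases h1 : c = '-' <;> by_cases h2 : c = '.' <;> by_cases h3 : c = '_' <;>
    simp [aOk, h1, h2, h3, char_beq_decide]

-- the collapsed string, written with the previous source character as state
def keep : Char → List Char → List Char
  | _, [] => []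
  | p, c :: r => if c == '.' && p == '.' then keep c r else c :: keep c r

theorem aStep3_eq_keep (l : List Char) : ∀ (p : Char) (tmp : List Char),
    aStep3 l (p == '.') tmp = tmp ++ keep p l := by
  induction l with
  | nil => intro p tmp; simp [aStep3, keep]
  | cons c r ih =>
    intro p tmp
    by_cases hc : c = '.'
    · subst hc
      by_cases hp : p = '.'
      · subst hp
        have e : aStep3 ('.' :: r) ('.' == '.') tmp = aStep3 r ('.' == '.') tmp := by
          simp [aStep3]
        rw [e, ih '.' tmp]
        simp [keep]
      · have hpb : (p == '.') = false := by simpa using hp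
        have e : aStep3 ('.' :: r) (p == '.') tmp = aStep3 r true (tmp ++ ['.']) := by
          simp [aStep3, hpb]
        rw [e, show (true : Bool) = ('.' == '.') from rfl, ih '.' (tmp ++ ['.'])]
        simp [keep, hpb]
    · have hcb : (c == '.') = false := by simpa using hc
      have e : aStep3 (c :: r) (p == '.') tmp = aStep3 r false (tmp ++ [c]) := by
        simp [aStep3, hcb]
      rw [e, show (false : Bool) = (c == '.') from (by simp [hcb]), ih c (tmp ++ [c])]
      simp [keep, hcb]

-- B's fused scan is A's collapse loop run on A's filtered lowered list
theorem bScan_eq (cs : List Char) : ∀ (out : List Char) (prev : Bool),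
    bScan cs out prev = aStep3 ((PySem.Chars.lower cs).filter aOk) prev out := by
  induction cs with
  | nil => intro out prev; simp [bScan, PySem.Chars.lower, aStep3]
  | cons c0 r ih =>
    intro out prev
    have hl : PySem.Chars.lower (c0 :: r) = PySem.Chars.lowerChar c0 :: PySem.Chars.lower r := by
      simp [PySem.Chars.lower]
    set c := PySem.Chars.lowerChar c0 with hcdef
    by_cases hdot : (c == '.') = true
    · have hc' : c = '.' := by simpa using hdot
      have hok : aOk c = true := by rw [aOk_split, hdot]; simp
      cases prev with
      | true =>
        have eb : bScan (c0 :: r) out true = bScan r out true := by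
          simp only [bScan]
          rw [if_pos (by simpa using hdot)]
          simp
        have ea : aStep3 (c :: (PySem.Chars.lower r).filter aOk) true out
            = aStep3 ((PySem.Chars.lower r).filter aOk) true out := by
          simp [aStep3, hdot]
        rw [eb, hl, List.filter_cons_of_pos hok, ea, ih]
      | false =>
        have eb : bScan (c0 :: r) out false = bScan r (out ++ ['.']) true := by
          simp only [bScan]
          rw [if_pos (by simpa using hdot)]
          simp
        have ea : aStep3 (c :: (PySem.Chars.lower r).filter aOk) false out
            = aStep3 ((PySem.Chars.lower r).filter aOk) true (out ++ ['.']) := by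
          simp [aStep3, hdot, hc']
        rw [eb, hl, List.filter_cons_of_pos hok, ea, ih]
    · have hdb : (c == '.') = false := by simpa using hdot
      by_cases hk : (PySem.Chars.isalpha c || PySem.Chars.isdigit c || ['-', '_'].contains c) = true
      · have hok : aOk c = true := by rw [aOk_split, hk]; simp
        have eb : bScan (c0 :: r) out prev = bScan r (out ++ [c]) false := by
          simp only [bScan]
          rw [if_neg (by simp [← hcdef, hdb]), if_pos (by rw [← hcdef]; simpa using hk)]
        have ea : aStep3 (c :: (PySem.Chars.lower r).filter aOk) prev out
            = aStep3 ((PySem.Chars.lower r).filter aOk) false (out ++ [c]) := by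
          simp [aStep3, hdb]
        rw [eb, hl, List.filter_cons_of_pos hok, ea, ih]
      · have hkb : (PySem.Chars.isalpha c || PySem.Chars.isdigit c || ['-', '_'].contains c) = false := by
          simpa using hk
        have hok : aOk c = false := by rw [aOk_split, hdb, hkb]; rfl
        have eb : bScan (c0 :: r) out prev = bScan r out prev := by
          simp only [bScan]
          rw [if_neg (by simp [← hcdef, hdb]), if_neg (by rw [← hcdef]; simpa using hkb)]
        rw [eb, hl, List.filter_cons_of_neg (by simp [hok]), ih]

-- the sentinel-dot scan strips the (single, collapsed) leading dot
theorem keep_dot (l : List Char) :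
    keep '.' l = (if (keep 'x' l).head? = some '.' then (keep 'x' l).tail else (keep 'x' l)) := by
  cases l with
  | nil => simp [keep]
  | cons c r =>
    by_cases hc : c = '.'
    · subst hc; simp [keep]
    · have hcb : (c == '.') = false := by simpa using hc
      simp [keep, hcb, hc]

-- no two adjacent dots
def Nd (l : List Char) : Prop := List.IsChain (fun a b : Char => ¬(a = '.' ∧ b = '.')) l

theorem keep_head_ne (l : List Char) : (keep '.' l).head? ≠ some '.' := by
  induction l with
  | nil => simp [keep]
  | cons c r ih =>
    by_cases hc : c == '.'
    · have hc' : c = '.' := by simpa using hc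
      subst hc'; simpa [keep] using ih
    · have hc' : ¬ c = '.' := by simpa using hc
      simp [keep, hc, hc']

theorem keep_nd (l : List Char) : ∀ p, Nd (keep p l) := by
  induction l with
  | nil => intro p; simp [keep, Nd]
  | cons c r ih =>
    intro p
    by_cases hc : c == '.'
    · have hc' : c = '.' := by simpa using hc
      by_cases hp : p == '.'
      · simpa [keep, hc, hp] using ih c
      · have : keep p (c :: r) = c :: keep c r := by simp [keep, hp]
        rw [this, Nd, List.isChain_cons']
        refine ⟨?_, ih c⟩
        intro y hy
        subst hc'
        intro ⟨_, hy'⟩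
        exact keep_head_ne r (by rw [hy]; exact congrArg some hy')
    · have hc' : ¬ c = '.' := by simpa using hc
      have : keep p (c :: r) = c :: keep c r := by simp [keep, hc]
      rw [this, Nd, List.isChain_cons']
      exact ⟨fun y _ h => hc' h.1, ih c⟩

theorem nd_tail (m : List Char) (h : Nd m) : Nd m.tail := by
  cases m with
  | nil => exact h
  | cons c r => rw [Nd, List.isChain_cons'] at h; exact h.2

-- dropping a trailing dot of a no-adjacent-dots list leaves no trailing dot
theorem nd_dropLast_last (L : List Char) (h : Nd L) :
    (if L.getLast? = some '.' then L.dropLast else L).getLast? ≠ some '.' := by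
  induction L using List.reverseRecOn with
  | nil => simp
  | append_singleton M a _ =>
    by_cases ha : a = '.'
    · subst ha
      rw [if_pos (by simp)]
      rw [List.dropLast_concat]
      intro hM
      obtain ⟨N, hN⟩ := List.getLast?_eq_some_iff.mp hM
      rw [hN] at h
      rw [Nd] at h
      rw [show N ++ ['.'] ++ ['.'] = N ++ ('.' :: '.' :: []) by simp] at h
      have := (List.isChain_append).1 h
      rcases this with ⟨_, h2, _⟩
      rw [List.isChain_cons'] at h2
      exact h2.1 '.' rfl ⟨rfl, rfl⟩
    · rw [if_neg (by simp [ha])]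
      simp [ha]

-- the one-dot strip, as a definition usable on both sides of the proof
def strip1 (k : List Char) : List Char :=
  let L := if k.head? = some '.' then k.tail else k
  if L.getLast? = some '.' then L.dropLast else L

-- singleton-suffix ↔ last element
theorem endswith_dot (u : List Char) :
    PySem.Chars.endswith u ['.'] = (u.getLast? == some '.') := by
  by_cases h : u.getLast? = some '.'
  · have hs : ['.'] <:+ u := ⟨u.dropLast, List.dropLast_append_getLast? '.' h⟩
    rw [(PySem.Chars.endswith_iff u ['.']).2 hs]
    simp [h]
  · cases he : PySem.Chars.endswith u ['.'] with
    | false => simp [h]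
    | true =>
      obtain ⟨t, ht⟩ := (PySem.Chars.endswith_iff u ['.']).1 he
      rw [← ht] at h
      simp at h

-- slice / indexing bridges used by both ports
theorem slice_drop1 (l : List Char) : PySem.List.slice l (some 1) none = l.tail := by
  simp [pysem]

theorem slice_dropLast (l : List Char) : PySem.List.slice l none (some (-1)) = l.dropLast := by
  simp [pysem]

theorem slice_take15 (l : List Char) : PySem.List.slice l none (some 15) = l.take 15 := by
  simp [pysem]

theorem slice_mid (l : List Char) : PySem.List.slice l (some 1) (some (-1)) = l.tail.dropLast := by
  simp [PySem.List.slice]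
  cases l with
  | nil => simp
  | cons a r => simp [List.dropLast_eq_take]

theorem pyGet_neg1 (l : List Char) : PySem.List.pyGet? l (-1) = l.getLast? := by
  simp [pysem]

theorem pyGet_zero (c : Char) (r : List Char) : PySem.List.pyGet? (c :: r) 0 = some c := by
  simp [pysem]

theorem keep_ne_nil (c : Char) (r : List Char) : keep 'x' (c :: r) ≠ [] := by
  have hx : ('x' == '.') = false := by decide
  by_cases hc : c == '.' <;> simp [keep, hc, hx]

-- A's four-branch one-dot strip is strip1, for any nonempty list
theorem stepfour_eq (k : List Char) (c lc : Char) (hh : k.head? = some c) (hl : k.getLast? = some lc) :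
    (if c == '.' && lc != '.' then k.tail
     else if c != '.' && lc == '.' then k.dropLast
     else if c == '.' && lc == '.' then k.tail.dropLast
     else k) = strip1 k := by
  cases k with
  | nil => simp at hh
  | cons a r =>
    simp at hh
    subst hh
    cases r with
    | nil =>
      simp at hl
      subst hl
      by_cases hc : a = '.' <;> simp [strip1, hc, char_beq_decide, bne]
    | cons b r' =>
      have hl2 : (b :: r').getLast? = some lc := by simpa using hl
      by_cases hc : a = '.' <;> by_cases hlc : lc = '.' <;>
        simp [strip1, hc, hlc, char_beq_decide, bne, hl, hl2]

-- B's pop step is strip1's trailing conditional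
theorem pop_eq (t : List Char) :
    (if !t.isEmpty && (PySem.List.pyGet? t (-1) == some '.') then t.dropLast else t)
      = (if t.getLast? = some '.' then t.dropLast else t) := by
  cases t with
  | nil => simp
  | cons a r =>
    rw [pyGet_neg1]
    by_cases h : (a :: r).getLast? = some '.' <;> simp [h]

-- step 7: the padding while-loop is a closed-form repeat of the last character
theorem pad_eq (w : List Char) (hw : w ≠ []) :
    (if w.length ≤ 2 then aPad 3 w else w) =
      w ++ List.replicate (3 - w.length) ((PySem.List.pyGet? w (-1)).getD 'a') := by
  match w with
  | [] => exact absurd rfl hw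
  | [a] =>
    have e1 : PySem.List.pyGet? [a] (-1) = some a := by rw [pyGet_neg1]; rfl
    have e2 : PySem.List.pyGet? [a, a] (-1) = some a := by rw [pyGet_neg1]; rfl
    simp [aPad, e1, e2]
  | [a, b] =>
    have e2 : PySem.List.pyGet? [a, b] (-1) = some b := by rw [pyGet_neg1]; rfl
    simp [aPad, e2]
  | a :: b :: c :: r =>
    have h3 : ¬ (a :: b :: c :: r).length ≤ 2 := by simp
    rw [if_neg h3, show 3 - (a :: b :: c :: r).length = 0 by simp, List.replicate_zero,
      List.append_nil]

theorem solution_spec : Claim_equal_solution := by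
  intro s _ hpre
  unfold Spec_solution
  simp only [solution, solution_alt]
  -- steps 1-2: A's lowered filtered list l
  have h1 : s.toList.map (fun c => if PySem.Chars.isupper c then PySem.Chars.lowerChar c else c)
      = PySem.Chars.lower s.toList := by
    simp only [PySem.Chars.lower]
    exact List.map_congr_left (fun c _ => lower_step c)
  rw [h1]
  set l := (PySem.Chars.lower s.toList).filter aOk with hldef
  -- the filtered list is nonempty (Pre_)
  have hlne : l ≠ [] := by
    unfold Pre_solution at hpre
    obtain ⟨c, hc, hok⟩ := List.any_eq_true.mp hpre
    intro hnil
    have hm : PySem.Chars.lowerChar c ∈ l := by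
      rw [hldef]
      refine List.mem_filter.2 ⟨?_, hok⟩
      simp only [PySem.Chars.lower]
      exact List.mem_map.2 ⟨c, hc, rfl⟩
    rw [hnil] at hm
    exact absurd hm (List.not_mem_nil)
  -- A's step 3 = keep 'x' l; B's scan = keep '.' l
  have h3a : aStep3 l false [] = keep 'x' l := by
    have h := aStep3_eq_keep l 'x' []
    rw [show ('x' == '.') = false from by decide] at h
    simpa using h
  have h3b : bScan s.toList [] true = keep '.' l := by
    rw [bScan_eq, ← hldef]
    have h := aStep3_eq_keep l '.' []
    rw [show ('.' == '.') = true from by decide] at h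
    simpa using h
  rw [h3a, h3b]
  set k := keep 'x' l with hkdef
  have hknd : Nd k := by rw [hkdef]; exact keep_nd l 'x'
  have hkne : k ≠ [] := by
    cases hl : l with
    | nil => exact absurd hl hlne
    | cons c r =>
      rw [hkdef, hl]
      exact keep_ne_nil c r
  obtain ⟨cH, kr, hk⟩ : ∃ cH kr, k = cH :: kr := by
    cases hke : k with
    | nil => exact absurd hke hkne
    | cons c r => exact ⟨c, r, rfl⟩
  have hhead : k.head? = some cH := by rw [hk]; rfl
  have hlast : k.getLast? = some (k.getLast hkne) := List.getLast?_eq_getLast hkne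
  set lc := k.getLast hkne with hlcdef
  have hg0 : PySem.List.pyGet? k 0 = some cH := by rw [hk]; exact pyGet_zero cH kr
  have hg1 : PySem.List.pyGet? k (-1) = some lc := by rw [pyGet_neg1, hlast]
  rw [hg0, hg1]
  simp only [slice_drop1, slice_dropLast, slice_mid]
  -- A's step 4 = strip1 k; B's sentinel scan + pop = strip1 k
  rw [stepfour_eq k cH lc hhead hlast]
  have hB4 : (if !(keep '.' l).isEmpty && (PySem.List.pyGet? (keep '.' l) (-1) == some '.')
      then (keep '.' l).dropLast else keep '.' l) = strip1 k := by
    rw [pop_eq, keep_dot l, ← hkdef, strip1]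
  rw [hB4]
  set m := strip1 k with hmdef
  have hmlast : m.getLast? ≠ some '.' := by
    rw [hmdef, strip1]
    exact nd_dropLast_last _ (by split <;> [exact nd_tail k hknd; exact hknd])
  -- step 5 agrees
  have h5 : (if m.isEmpty then ['a'] else m) = (if m.length = 0 then ['a'] else m) := by
    by_cases hm : m = [] <;> simp [hm]
  rw [h5]
  set v := if m.length = 0 then ['a'] else m with hvdef
  have hvne : v ≠ [] := by
    rw [hvdef]; split
    · simp
    · next hm => intro h; rw [h] at hm; simp at hm
  have hvlast : v.getLast? ≠ some '.' := by
    rw [hvdef]; split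
    · decide
    · exact hmlast
  -- step 6 agrees
  have hEnd : ∀ u : List Char, PySem.Chars.endswith u ['.']
      = (PySem.List.pyGet? u (-1) == some '.') := fun u => by rw [endswith_dot, pyGet_neg1]
  rw [hEnd]
  by_cases h16 : 16 ≤ v.length
  · rw [if_pos h16]
    set w := if (PySem.List.pyGet? (PySem.List.slice v none (some 15)) (-1) == some '.') = true
      then (PySem.List.slice v none (some 15)).dropLast
      else PySem.List.slice v none (some 15) with hwdef
    have hwlen : w.length ≠ 0 := by
      rw [hwdef]; split <;> simp [slice_take15, List.length_take] <;> omega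
    have hwne : w ≠ [] := fun h => hwlen (by rw [h]; rfl)
    exact congrArg String.mk (pad_eq w hwne)
  · rw [if_neg h16]
    have hvtake : PySem.List.slice v none (some 15) = v := by
      rw [slice_take15]; exact List.take_of_length_le (by omega)
    rw [hvtake]
    have hcond : (PySem.List.pyGet? v (-1) == some '.') = false := by
      rw [pyGet_neg1]
      simpa using hvlast
    rw [hcond]
    simp only [Bool.false_eq_true, if_false]
    exact congrArg String.mk (pad_eq v hvne)
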